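-- pv_equiv track=rewrite | github.com/hi-rachel/Algorithms | 백준/Silver/3085. 사탕 게임/사탕 게임.py | count_row
-- ===== SOURCE A (Python) =====
-- def count_row(board, n, row):
--     """특정 행에서 최대 연속 길이를 반환"""
--     max_count = 1
--     count = 1
--     for j in range(1, n):
--         if board[row][j] == board[row][j-1]:
--             count += 1
--         else:
--             max_count = max(max_count, count)
--             count = 1
--     return max(max_count, count)
-- ===== SOURCE B (Python) =====
-- def count_row(board, n, row):
--     """특정 행에서 최대 연속 길이를 반환 (run-chopping reformulation)"""
--     if n <= 1:
--         return 1
--     vals = board[row][:n]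
--     best = 0
--     while vals:
--         head = vals[0]
--         k = 1
--         while k < len(vals) and vals[k] == head:
--             k += 1
--         best = max(best, k)
--         vals = vals[k:]
--     return best
-- ===== Notes on version B (the rewrite author's own statement) =====
-- stated objective: alternative
-- what changed: B slices the row prefix and repeatedly chops off the maximal leading run (maximizing over run lengths), instead of A's single index loop over range(1, n) with a running counter and running max.
import Mathlib
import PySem

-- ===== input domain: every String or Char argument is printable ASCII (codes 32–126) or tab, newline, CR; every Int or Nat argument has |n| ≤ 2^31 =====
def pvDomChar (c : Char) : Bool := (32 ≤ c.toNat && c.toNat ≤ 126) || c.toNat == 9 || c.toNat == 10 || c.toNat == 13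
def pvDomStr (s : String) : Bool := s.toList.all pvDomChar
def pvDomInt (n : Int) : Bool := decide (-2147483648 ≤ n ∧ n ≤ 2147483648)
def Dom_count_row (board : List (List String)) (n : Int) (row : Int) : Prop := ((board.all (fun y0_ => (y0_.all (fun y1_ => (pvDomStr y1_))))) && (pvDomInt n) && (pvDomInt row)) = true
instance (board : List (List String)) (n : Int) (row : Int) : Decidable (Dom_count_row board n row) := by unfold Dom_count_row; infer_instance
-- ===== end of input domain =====

-- B re-decomposes the scan: it slices the row prefix and repeatedly chops off the maximal
-- leading run, maximizing over the run lengths, instead of A's index loop with a running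
-- counter and running max (objective: alternative; same cost).

-- ===== PORT A =====
def count_row (board : List (List String)) (n : Int) (row : Int) : Int :=
  -- max_count = 1; count = 1; for j in range(1, n): …; return max(max_count, count)
  let s := (PySem.List.pyRange 1 n 1).foldl
    (fun (s : Int × Int) j =>
      if PySem.List.pyGetD ((PySem.List.pyGet? board row).getD []) j ""
         == PySem.List.pyGetD ((PySem.List.pyGet? board row).getD []) (j - 1) ""
      then (s.1, s.2 + 1)
      else (max s.1 s.2, 1))
    (1, 1)
  max s.1 s.2

-- ===== PORT B =====
-- the outer 'while vals:' loop; the inner counting while-loop 'k = 1; while k < len(vals)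
-- and vals[k] == head: k += 1' is ported as 1 + length of the leading run of rest (exact:
-- it counts exactly the leading elements of rest equal to head), and 'vals = vals[k:]'
-- drops that run.
def chopRuns (best : Int) (vals : List String) : Int :=
  match vals with
  | [] => best
  | head :: rest =>
    let run := (rest.takeWhile (fun x => x == head)).length
    chopRuns (max best (1 + (run : Int))) (rest.drop run)
termination_by vals.length
decreasing_by simp

def count_row_alt (board : List (List String)) (n : Int) (row : Int) : Int :=
  if n ≤ 1 then 1
  else chopRuns 0 (PySem.List.slice ((PySem.List.pyGet? board row).getD []) none (some n))

-- ===== PRECONDITION & SPEC =====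
-- Pre_ excludes exactly the inputs where A raises (IndexError): n ≥ 2 with board[row]
-- missing or shorter than n.
def Pre_count_row (board : List (List String)) (n : Int) (row : Int) : Prop :=
  2 ≤ n → n ≤ ((PySem.List.pyGet? board row).map (fun r => (r.length : Int))).getD 0
instance (board : List (List String)) (n : Int) (row : Int) : Decidable (Pre_count_row board n row) := by unfold Pre_count_row; infer_instance

def pvWitness_count_row : List (List String) × Int × Int := ([["a", "a", "b"]], 3, 0)

def Spec_count_row (board : List (List String)) (n : Int) (row : Int) (out : Int) : Prop := out = count_row_alt board n row
instance (board : List (List String)) (n : Int) (row : Int) (out : Int) : Decidable (Spec_count_row board n row out) := by unfold Spec_count_row; infer_instance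

-- ===== CLAIM (what is proved, stated in full; the proofs are below) =====
def Claim_equal_count_row : Prop := ∀ (board : List (List String)) (n : Int) (row : Int), Dom_count_row board n row → Pre_count_row board n row → Spec_count_row board n row (count_row board n row)

-- ===== LEMMAS AND PROOFS =====

-- A's loop, structurally: state (max_count, count), previous element, remaining elements.
def pvRunFold (s : Int × Int) (prev : String) : List String → Int × Int
  | [] => s
  | x :: xs => if x == prev then pvRunFold (s.1, s.2 + 1) x xs else pvRunFold (max s.1 s.2, 1) x xs

-- the list of run lengths, with the current run already counted to c
def pvRunsAux (prev : String) (c : Int) : List String → List Int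
  | [] => [c]
  | x :: xs => if x == prev then pvRunsAux x (c + 1) xs else c :: pvRunsAux x 1 xs

def pvMax0 (L : List Int) : Int := L.foldl max 0

theorem pv_foldl_max_max (L : List Int) (a b : Int) :
    L.foldl max (max a b) = max a (L.foldl max b) := by
  induction L generalizing b with
  | nil => rfl
  | cons x xs ih => simpa [max_assoc] using ih (max b x)

theorem pv_le_runsAux (l : List String) (prev : String) (c : Int) :
    c ≤ pvMax0 (pvRunsAux prev c l) := by
  induction l generalizing prev c with
  | nil => simp [pvRunsAux, pvMax0]
  | cons x xs ih =>
    by_cases h : (x == prev) = true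
    · have := ih x (c + 1); simp [pvRunsAux, h] at this ⊢; omega
    · have h2 := (PySem.List.le_foldl_max (pvRunsAux x 1 xs) (max 0 c)).1
      simp [pvRunsAux, h, pvMax0] at h2 ⊢
      omega

theorem pv_runFold_max (l : List String) (prev : String) (M C : Int) (hC : 1 ≤ C) :
    max (pvRunFold (M, C) prev l).1 (pvRunFold (M, C) prev l).2
      = max M (pvMax0 (pvRunsAux prev C l)) := by
  induction l generalizing prev M C with
  | nil =>
    simp [pvRunFold, pvRunsAux, pvMax0, List.foldl]
    omega
  | cons x xs ih =>
    by_cases h : (x == prev) = true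
    · simpa [pvRunFold, pvRunsAux, h] using ih x M (C + 1) (by omega)
    · rw [show pvRunFold (M, C) prev (x :: xs) = pvRunFold (max M C, 1) x xs by
        simp [pvRunFold, h]]
      rw [show pvRunsAux prev C (x :: xs) = C :: pvRunsAux x 1 xs by simp [pvRunsAux, h]]
      rw [ih x (max M C) 1 le_rfl]
      simp only [pvMax0, List.foldl]
      rw [show max 0 C = max C 0 by omega, pv_foldl_max_max]
      omega

theorem pv_runsAux_takeWhile (l : List String) (prev : String) (c : Int) :
    pvRunsAux prev c l
      = pvRunsAux prev (c + ((l.takeWhile (fun x => x == prev)).length : Int))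
          (l.dropWhile (fun x => x == prev)) := by
  induction l generalizing prev c with
  | nil => simp [pvRunsAux]
  | cons x xs ih =>
    by_cases h : (x == prev) = true
    · have hx : x = prev := by simpa using h
      subst hx
      rw [show pvRunsAux x c (x :: xs) = pvRunsAux x (c + 1) xs by simp [pvRunsAux]]
      rw [ih x (c + 1)]
      simp
      ring_nf
    · simp [pvRunsAux, h]

theorem pv_dropWhile_eq_drop (l : List String) (p : String → Bool) :
    l.dropWhile p = l.drop (l.takeWhile p).length := by
  induction l with
  | nil => rfl
  | cons x xs ih => by_cases h : p x = true <;> simp [h, ih]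

theorem pv_chopRuns_eq (N : Nat) : ∀ (vals : List String), vals.length ≤ N → ∀ best : Int,
    chopRuns best vals
      = match vals with
        | [] => best
        | h :: rest => max best (pvMax0 (pvRunsAux h 1 rest)) := by
  induction N with
  | zero =>
    intro vals hlen best
    match vals with
    | [] => rw [chopRuns]
    | h :: rest => simp at hlen
  | succ N ih =>
    intro vals hlen best
    match vals with
    | [] => rw [chopRuns]
    | h :: rest =>
      rw [chopRuns]
      have hdw : rest.dropWhile (fun x => x == h)
          = rest.drop (rest.takeWhile (fun x => x == h)).length :=
        pv_dropWhile_eq_drop rest _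
      set run := (rest.takeWhile (fun x => x == h)).length with hrun
      have hlen2 : (rest.drop run).length ≤ N := by
        simp at hlen ⊢; omega
      rw [ih (rest.drop run) hlen2 (max best (1 + (run : Int)))]
      change _ = max best (pvMax0 (pvRunsAux h 1 rest))
      have hsplit := pv_runsAux_takeWhile rest h 1
      rw [hdw, ← hrun] at hsplit
      rw [hsplit]
      cases hdrop : rest.drop run with
      | nil =>
        simp [pvRunsAux, pvMax0]
        omega
      | cons x xs =>
        have hx : (x == h) = false := by
          have hne : rest.dropWhile (fun y => y == h) ≠ [] := by
            rw [hdw, hdrop]; simp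
          have hhead := List.head_dropWhile_not (fun y => y == h) hne
          have : (rest.dropWhile (fun y => y == h)).head hne = x := by
            have h2 : rest.dropWhile (fun y => y == h) = x :: xs := by rw [hdw, hdrop]
            simp [h2]
          rwa [this] at hhead
        rw [show pvRunsAux h (1 + (run : Int)) (x :: xs) = (1 + (run : Int)) :: pvRunsAux x 1 xs by
          simp [pvRunsAux, hx]]
        simp only [pvMax0, List.foldl]
        rw [show max 0 (1 + (run : Int)) = max (1 + (run : Int)) 0 by omega, pv_foldl_max_max]
        omega

-- A's pyRange loop equals the structural pvRunFold on the corresponding segment of r.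
theorem pv_A_loop (r : List String) (m : Nat) (hm : m ≤ r.length) :
    ∀ (k a : Nat) (s : Int × Int), 1 ≤ a → a + k = m →
      (PySem.List.pyRange (a : Int) (m : Int) 1).foldl
        (fun (s : Int × Int) j =>
          if PySem.List.pyGetD r j "" == PySem.List.pyGetD r (j - 1) ""
          then (s.1, s.2 + 1)
          else (max s.1 s.2, 1)) s
      = pvRunFold s (r.getD (a - 1) "") ((r.drop a).take k) := by
  intro k
  induction k with
  | zero =>
    intro a s ha hk
    rw [PySem.List.pyRange_one_eq_nil (by omega)]
    simp [pvRunFold]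
  | succ k ih =>
    intro a s ha hk
    have halt : (a : Int) < (m : Int) := by exact_mod_cast (by omega : a < m)
    rw [PySem.List.pyRange_one_cons halt]
    have haL : a < r.length := by omega
    have hget : PySem.List.pyGetD r (a : Int) "" = r[a] := by
      simp [PySem.List.pyGetD_natCast, haL]
    have hget' : PySem.List.pyGetD r ((a : Int) - 1) "" = r.getD (a - 1) "" := by
      rw [show ((a : Int) - 1) = (((a - 1 : Nat)) : Int) by omega]
      simp [PySem.List.pyGetD_natCast]
    have hdrop : r.drop a = r[a] :: r.drop (a + 1) := List.drop_eq_getElem_cons haL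
    rw [List.foldl_cons, hdrop]
    simp only [List.take_succ_cons]
    rw [pvRunFold, hget, hget']
    by_cases hEq : (r[a] == r.getD (a - 1) "") = true
    · have h2 := ih (a + 1) (s.1, s.2 + 1) (by omega) (by omega)
      simp only [Nat.cast_add, Nat.cast_one, Nat.add_sub_cancel] at h2
      rw [show (r.getD a "") = r[a] by simp [haL]] at h2
      rw [if_pos hEq, if_pos hEq]
      exact h2
    · have h2 := ih (a + 1) (max s.1 s.2, 1) (by omega) (by omega)
      simp only [Nat.cast_add, Nat.cast_one, Nat.add_sub_cancel] at h2
      rw [show (r.getD a "") = r[a] by simp [haL]] at h2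
      rw [if_neg hEq, if_neg hEq]
      exact h2

-- ===== VERDICT (by name: the statement is the Claim_ definition above) =====
theorem count_row_spec : Claim_equal_count_row := by
  intro board n row _hdom hpre
  unfold Spec_count_row
  by_cases hn : n ≤ 1
  · -- range(1, n) is empty; both sides are 1
    unfold count_row count_row_alt
    rw [PySem.List.pyRange_one_eq_nil hn]
    simp [hn]
  · have h2 : 2 ≤ n := by omega
    unfold Pre_count_row at hpre
    have hle := hpre h2
    match hr : PySem.List.pyGet? board row with
    | none => rw [hr] at hle; simp at hle; omega
    | some r =>
      rw [hr] at hle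
      simp at hle
      set m := n.toNat with hm
      have hn' : n = (m : Int) := by omega
      have hmr : m ≤ r.length := by omega
      have hm2 : 2 ≤ m := by omega
      have hrne : r ≠ [] := by intro h; subst h; simp at hmr; omega
      -- A side
      unfold count_row
      rw [hr, show (Option.getD (some r) ([] : List String)) = r from rfl]
      have hA := pv_A_loop r m hmr (m - 1) 1 (1, 1) le_rfl (by omega)
      rw [show (((1 : Nat) : Int)) = (1 : Int) from rfl,
        show ((1 : Nat) - 1) = 0 from rfl] at hA
      rw [hn', hA]
      show max (pvRunFold (1, 1) (r.getD 0 "") ((r.drop 1).take (m - 1))).1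
            (pvRunFold (1, 1) (r.getD 0 "") ((r.drop 1).take (m - 1))).2 = _
      -- B side
      unfold count_row_alt
      rw [if_neg (show ¬ ((m : Int) ≤ 1) by omega), hr,
        show (Option.getD (some r) ([] : List String)) = r from rfl]
      rw [PySem.List.slice_to_natCast]
      have htake : r.take m = r.getD 0 "" :: ((r.drop 1).take (m - 1)) := by
        match r, hrne with
        | x :: rest, _ =>
          match m, hm2 with
          | (k + 1), _ => simp [List.getD]
      rw [htake,
        pv_chopRuns_eq ((r.getD 0 "" :: (r.drop 1).take (m - 1)).length) _ le_rfl 0]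
      change _ = max 0 (pvMax0 (pvRunsAux (r.getD 0 "") 1 ((r.drop 1).take (m - 1))))
      rw [pv_runFold_max _ _ 1 1 le_rfl]
      have hge := pv_le_runsAux ((r.drop 1).take (m - 1)) (r.getD 0 "") 1
      omega
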